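-- pv_equiv track=rewrite | github.com/T-101/aoc17 | day04/__init__.py | day04_2
-- ===== SOURCE A (Python) =====
-- def day04_2(arr):
--     ret_arr = []
--     for row in arr:
--         fail = False
--         row_temp = row.split()
--         while len(row_temp):
--             sorted_word = ''.join(sorted([s for s in row_temp.pop(0)]))
--             for item in row_temp:
--                 if sorted_word == ''.join(sorted([s for s in item])):
--                     fail = True
--
--         if not fail:
--             ret_arr.append(row)
--     return ret_arr
-- ===== SOURCE B (Python) =====
-- def day04_2(arr):
--     out = []
--     for row in arr:
--         sigs = sorted(''.join(sorted(w)) for w in row.split())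
--         if all(x != y for x, y in zip(sigs, sigs[1:])):
--             out.append(row)
--     return out
-- ===== Notes on version B (the rewrite author's own statement) =====
-- stated objective: alternative
-- what changed: Replaces A's destructive pop-and-rescan loop comparing every word pair by canonicalising each word once, sorting the signature list, and a single adjacent-pair scan for duplicates.
import Mathlib
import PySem

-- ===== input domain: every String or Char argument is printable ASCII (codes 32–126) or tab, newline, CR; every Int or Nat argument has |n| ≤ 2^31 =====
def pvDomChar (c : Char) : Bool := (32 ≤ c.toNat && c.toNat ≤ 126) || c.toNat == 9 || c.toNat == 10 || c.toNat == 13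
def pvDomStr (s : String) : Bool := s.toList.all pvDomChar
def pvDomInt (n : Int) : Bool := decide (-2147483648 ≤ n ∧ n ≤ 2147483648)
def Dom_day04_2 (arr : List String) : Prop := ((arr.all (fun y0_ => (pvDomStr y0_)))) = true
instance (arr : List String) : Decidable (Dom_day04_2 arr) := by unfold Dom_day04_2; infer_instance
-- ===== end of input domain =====

-- B filters rows whose word-signatures, sorted, contain no adjacent duplicate, instead of
-- A's destructive pop-and-rescan over the word list (objective: alternative algorithm,
-- sort-then-adjacent-scan instead of pairwise comparison).

-- ===== PORT A =====
-- ''.join(sorted([s for s in w])) : a join of single-character strings is exactly the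
-- string of the sorted characters.
def pvSortJoinA (w : String) : String :=
  String.ofList (PySem.List.sorted w.toList (fun c => c) false)

-- the 'while len(row_temp):' loop: pop the head, set fail on any later word with equal signature
def pvWhileA : List String → Bool → Bool
  | [], fail => fail
  | w :: rest, fail =>
      let sortedWord := pvSortJoinA w
      pvWhileA rest
        (rest.foldl (fun f item => if sortedWord = pvSortJoinA item then true else f) fail)

def day04_2 (arr : List String) : List String :=
  arr.foldl (fun retArr row =>
    if pvWhileA (PySem.Str.split₀ row) false then retArr else retArr ++ [row]) []

-- ===== PORT B =====
def pvCanon (w : String) : String :=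
  String.ofList (PySem.List.sorted w.toList (fun c => c) false)

def day04_2_alt (arr : List String) : List String :=
  arr.foldl (fun out row =>
    let sigs := PySem.List.sorted ((PySem.Str.split₀ row).map pvCanon) (fun x => x) false
    if (sigs.zip sigs.tail).all (fun p => p.1 ≠ p.2) then out ++ [row] else out) []

-- ===== PRECONDITION & SPEC =====
def Spec_day04_2 (arr : List String) (out : List String) : Prop := out = day04_2_alt arr
instance (arr : List String) (out : List String) : Decidable (Spec_day04_2 arr out) := by unfold Spec_day04_2; infer_instance

-- ===== CLAIM (what is proved, stated in full; the proofs are below) =====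
def Claim_equal_day04_2 : Prop := ∀ (arr : List String), Dom_day04_2 arr → Spec_day04_2 arr (day04_2 arr)

-- ===== LEMMAS AND PROOFS =====

-- A's inner for-loop is an 'any' over the remaining words
theorem pvInner_eq_any (sw : String) (rest : List String) (fail : Bool) :
    rest.foldl (fun f item => if sw = pvSortJoinA item then true else f) fail
      = (fail || rest.any (fun item => sw = pvSortJoinA item)) := by
  induction rest generalizing fail with
  | nil => simp
  | cons x xs ih =>
      simp only [List.foldl_cons, List.any_cons, ih]
      by_cases h : sw = pvSortJoinA x <;> simp [h]

-- A's while-loop detects exactly a duplicate among the signatures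
theorem pvWhileA_eq (ws : List String) (fail : Bool) :
    pvWhileA ws fail = (fail || !decide (ws.map pvSortJoinA).Nodup) := by
  induction ws generalizing fail with
  | nil => simp [pvWhileA]
  | cons w rest ih =>
      simp only [pvWhileA, pvInner_eq_any, ih, List.map_cons, List.nodup_cons]
      by_cases hmem : pvSortJoinA w ∈ rest.map pvSortJoinA
      · rcases List.mem_map.mp hmem with ⟨x, hx, hxe⟩
        have hany : rest.any (fun item => pvSortJoinA w = pvSortJoinA item) = true := by
          exact List.any_eq_true.mpr ⟨x, hx, by simp [hxe]⟩
        simp [hany, hmem]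
      · have hany : rest.any (fun item => pvSortJoinA w = pvSortJoinA item) = false := by
          rw [List.any_eq_false]
          intro x hx
          simp only [decide_eq_true_eq]
          intro he
          exact hmem (List.mem_map.mpr ⟨x, hx, he.symm⟩)
        simp [hany, hmem]

-- on a ≤-sorted list, B's adjacent-pair scan decides Nodup
theorem pvZipAll_eq_nodup (s : List String) (hs : s.Pairwise (fun a b => a ≤ b)) :
    (s.zip s.tail).all (fun p => p.1 ≠ p.2) = decide s.Nodup := by
  induction s with
  | nil => simp
  | cons a t ih =>
      rw [List.pairwise_cons] at hs
      cases t with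
      | nil => simp
      | cons b u =>
          have htail := ih hs.2
          simp only [List.tail_cons] at htail
          simp only [List.tail_cons, List.zip_cons_cons, List.all_cons, htail]
          by_cases hab : a = b
          · subst hab
            simp
          · have hnm : a ∉ b :: u := by
              intro hmem
              rcases List.mem_cons.mp hmem with h | h
              · exact hab h
              · -- a ∈ u: a ≤ b from hs, b ≤ a since b precedes u elementwise
                have h1 : a ≤ b := hs.1 b (List.mem_cons_self)
                have h2 : b ≤ a := (List.pairwise_cons.mp hs.2).1 a h
                exact hab (le_antisymm h1 h2)
            simp [List.nodup_cons, hab, hnm]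

-- per-row agreement: A keeps the row iff B keeps it
theorem pvRow_eq (row : String) :
    pvWhileA (PySem.Str.split₀ row) false
      = !((PySem.List.sorted ((PySem.Str.split₀ row).map pvCanon) (fun x => x) false).zip
            (PySem.List.sorted ((PySem.Str.split₀ row).map pvCanon) (fun x => x) false).tail).all
          (fun p => p.1 ≠ p.2) := by
  set sigs := (PySem.Str.split₀ row).map pvCanon with hsigs
  have hAB : pvCanon = pvSortJoinA := rfl
  have hpw : (PySem.List.sorted sigs (fun x => x) false).Pairwise (fun a b => a ≤ b) :=
    PySem.List.sorted_pairwise sigs (fun x => x)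
  have hperm : (PySem.List.sorted sigs (fun x => x) false).Perm sigs :=
    PySem.List.sorted_perm sigs (fun x => x) false
  rw [pvWhileA_eq, Bool.false_or, ← hAB, ← hsigs, pvZipAll_eq_nodup _ hpw]
  by_cases h : sigs.Nodup <;> simp [h, hperm.nodup_iff]

-- ===== VERDICT (by name: the statement is the Claim_ definition above) =====
theorem day04_2_spec : Claim_equal_day04_2 := by
  intro arr hd
  clear hd
  unfold Spec_day04_2 day04_2 day04_2_alt
  induction arr using List.reverseRecOn with
  | nil => rfl
  | append_singleton xs x ih =>
      rw [List.foldl_append, List.foldl_append, ih]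
      simp only [List.foldl_cons, List.foldl_nil, pvRow_eq]
      split_ifs with h1 h2 h3
      · rw [Bool.not_eq_true'] at h1
        rw [h1] at h2
        exact absurd h2 (by decide)
      · rfl
      · rfl
      · rw [Bool.not_eq_true] at h1
        rw [Bool.not_eq_false'] at h1
        exact absurd h1 h3
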